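-- pv_equiv track=rewrite | github.com/luaiabuelsamen/interviewpractice | daily.py | maxMedian
-- ===== SOURCE A (Python) =====
-- def maxMedian(nums):
--     sorted_nums = sorted(nums)
--
--     maxMedian = 0
--
--     while(len(sorted_nums) >= 3):
--         sorted_nums.pop()
--         maxMedian += sorted_nums.pop()
--         sorted_nums.pop(0)
--
--     return maxMedian
-- ===== SOURCE B (Python) =====
-- def maxMedian(nums):
--     s = sorted(nums)
--     n = len(s)
--     return sum(s[n - 2 * k] for k in range(1, n // 3 + 1))
-- ===== Notes on version B (the rewrite author's own statement) =====
-- stated objective: faster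
-- what changed: Replaces A's destructive while-loop of pop()/pop()/pop(0) on the sorted list (pop(0) is O(n) each round) by a single closed-index sum over the sorted list: sum of s[n-2k] for k=1..n//3.
import Mathlib
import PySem

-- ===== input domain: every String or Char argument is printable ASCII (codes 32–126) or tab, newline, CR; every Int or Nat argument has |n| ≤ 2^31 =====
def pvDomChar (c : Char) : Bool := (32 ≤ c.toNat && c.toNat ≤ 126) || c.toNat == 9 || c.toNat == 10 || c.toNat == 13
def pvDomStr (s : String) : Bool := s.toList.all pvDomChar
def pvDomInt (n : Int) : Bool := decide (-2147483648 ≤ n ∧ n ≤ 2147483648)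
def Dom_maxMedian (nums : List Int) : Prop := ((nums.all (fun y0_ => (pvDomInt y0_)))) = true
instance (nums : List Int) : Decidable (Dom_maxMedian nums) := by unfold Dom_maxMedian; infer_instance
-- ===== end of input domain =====

-- B replaces A's quadratic destructive pop(0)/pop() loop by a single sorted pass summing
-- s[n-2k] for k = 1..n//3 (objective: faster, asymptotic O(n log n) vs O(n^2)).

-- ===== PORT A =====
-- A's while loop: pop() (discard max), pop() (add second-largest), pop(0) (discard min).
def maxMedianLoop (l : List Int) (acc : Int) : Int :=
  if _h : 3 ≤ l.length then
    let l1 := l.dropLast                      -- sorted_nums.pop()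
    let m := l1.getLastD 0                    -- maxMedian += sorted_nums.pop()
    maxMedianLoop (l1.dropLast.drop 1) (acc + m)   -- … and sorted_nums.pop(0)
  else acc
termination_by l.length
decreasing_by simp_all; omega

def maxMedian (nums : List Int) : Int :=
  maxMedianLoop (PySem.List.sorted nums (fun x => x) false) 0

-- ===== PORT B =====
def maxMedian_alt (nums : List Int) : Int :=
  let s := PySem.List.sorted nums (fun x => x) false
  let n : Int := s.length
  ((PySem.List.pyRange 1 (PySem.Int.floordiv n 3 + 1) 1).map
      (fun k => PySem.List.pyGetD s (n - 2 * k) 0)).sum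

-- ===== PRECONDITION & SPEC =====
def Spec_maxMedian (nums : List Int) (out : Int) : Prop := out = maxMedian_alt nums
instance (nums : List Int) (out : Int) : Decidable (Spec_maxMedian nums out) := by unfold Spec_maxMedian; infer_instance

-- ===== CLAIM (what is proved, stated in full; the proofs are below) =====
def Claim_equal_maxMedian : Prop := ∀ (nums : List Int), Dom_maxMedian nums → Spec_maxMedian nums (maxMedian nums)

-- ===== LEMMAS AND PROOFS =====

-- A's loop equals the closed-index sum, for ANY list (sortedness plays no role).
lemma maxMedianLoop_eq (l : List Int) (acc : Int) :
    maxMedianLoop l acc =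
      acc + ((PySem.List.pyRange 1 ((l.length : Int) / 3 + 1) 1).map
        (fun k => PySem.List.pyGetD l ((l.length : Int) - 2 * k) 0)).sum := by
  induction l, acc using maxMedianLoop.induct with
  | case1 l acc h l1 m ih =>
    rw [maxMedianLoop]
    simp only [dif_pos h]
    rw [ih]
    have hl'len : (List.drop 1 l1.dropLast).length = l.length - 3 := by
      simp [l1]; omega
    rw [hl'len]
    rw [PySem.List.pyRange_one, PySem.List.pyRange_one]
    simp only [List.map_map]
    have hr : (((l.length : Int)/3 + 1) - 1).toNat
        = ((((l.length - 3 : Nat) : Int)/3 + 1) - 1).toNat + 1 := by omega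
    rw [hr, List.range_succ_eq_map]
    simp only [List.map_cons, List.sum_cons, List.map_map, Function.comp_def]
    have hshift : ∀ (i : Int), 0 ≤ i → i < (l.length : Int) - 3 →
        PySem.List.pyGetD (List.drop 1 l1.dropLast) i 0 = PySem.List.pyGetD l (i + 1) 0 := by
      intro i h0 hlt
      rw [PySem.List.pyGetD_eq_getElem _ _ h0 (by simp [l1]; omega),
          PySem.List.pyGetD_eq_getElem _ _ (by omega) (by omega)]
      simp only [l1, List.getElem_drop, List.getElem_dropLast]
      congr 1
      omega
    have hm : m = PySem.List.pyGetD l ((l.length : Int) - 2 * (1 + ((0:Nat):Int))) 0 := by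
      rw [PySem.List.pyGetD_eq_getElem _ _ (by push_cast; omega) (by push_cast; omega)]
      show l1.getLastD 0 = _
      rw [List.getLastD_eq_getLast?, List.getLast?_eq_getElem?]
      have hl1 : l1.length - 1 < l1.length := by simp [l1]; omega
      rw [List.getElem?_eq_getElem hl1]
      simp only [Option.getD_some, l1, List.getElem_dropLast]
      congr 1
      simp
      omega
    have hcongr : List.map (fun x : Nat => PySem.List.pyGetD (List.drop 1 l1.dropLast)
          (((l.length - 3 : Nat) : Int) - 2 * (1 + (x:Int))) 0)
          (List.range ((((l.length - 3 : Nat):Int) / 3 + 1) - 1).toNat)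
        = List.map (fun x : Nat => PySem.List.pyGetD l ((l.length : Int) - 2 * (1 + ((x.succ : Nat):Int))) 0)
          (List.range ((((l.length - 3 : Nat):Int) / 3 + 1) - 1).toNat) := by
      apply List.map_congr_left
      intro x hx
      rw [List.mem_range] at hx
      rw [hshift _ (by omega) (by omega)]
      congr 1
      push_cast
      omega
    rw [hcongr, ← hm]
    ring
  | case2 l acc h =>
    rw [maxMedianLoop]
    simp only [dif_neg h]
    have : ((l.length : Int) / 3 + 1) = 1 := by omega
    rw [this, PySem.List.pyRange_one_eq_nil (by omega)]
    simp

-- ===== VERDICT (by name: the statement is the Claim_ definition above) =====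
theorem maxMedian_spec : Claim_equal_maxMedian := by
  intro nums _
  unfold Spec_maxMedian maxMedian maxMedian_alt
  rw [maxMedianLoop_eq]
  simp only []
  rw [PySem.Int.floordiv_eq_ediv_of_pos (by omega)]
  simp
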